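-- pv_equiv track=rewrite | github.com/AlagappanRa/Personal-Projects | Factorial.py | sum_even_factorials
-- ===== SOURCE A (Python) =====
-- def sum_even_factorials(n):
--     def factorial(n):
--         if n == 0:
--             return 1
--         else:
--             return n*factorial(n-1)
--
--     result = 0
--     for x in range(n,-1,-2):
--         if n %2 != 0:
--             n = n-1
--         result += factorial(x)
--     return result
-- ===== SOURCE B (Python) =====
-- def sum_even_factorials(n):
--     total = 0
--     fact = 1
--     for i in range(0, n + 1):
--         if i > 0:
--             fact *= i
--         if i % 2 == n % 2:
--             total += fact
--     return total
-- ===== Notes on version B (the rewrite author's own statement) =====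
-- stated objective: faster
-- what changed: Replaced the descending loop that recomputes factorial(x) recursively from scratch for every term with one ascending pass maintaining a running factorial product, added whenever i has n's parity.
import Mathlib
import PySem

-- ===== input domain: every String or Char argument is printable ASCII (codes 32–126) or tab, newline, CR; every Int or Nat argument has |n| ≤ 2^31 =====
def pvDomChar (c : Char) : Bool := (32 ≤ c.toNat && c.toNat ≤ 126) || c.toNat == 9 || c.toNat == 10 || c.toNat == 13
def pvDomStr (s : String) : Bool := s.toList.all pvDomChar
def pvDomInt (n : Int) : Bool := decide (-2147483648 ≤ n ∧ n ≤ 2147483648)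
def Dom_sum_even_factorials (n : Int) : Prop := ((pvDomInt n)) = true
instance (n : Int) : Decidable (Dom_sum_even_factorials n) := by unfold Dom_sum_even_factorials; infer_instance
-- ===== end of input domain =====

-- B replaces A's descending loop that recomputes factorial(x) recursively for each
-- term by one ascending pass with a running factorial product.

-- ===== PORT A =====
-- A's inner `factorial` recurses on n-1; A only ever calls it with x ≥ 0, where this
-- Nat-structural recursion is exact (the port takes x.toNat at the call site).
def pvFactA : Nat → Int
  | 0 => 1
  | k + 1 => ((k : Int) + 1) * pvFactA k

-- loop body of A: state = (current value of the mutated variable n, result)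
def pvStepA (st : Int × Int) (x : Int) : Int × Int :=
  let n' := if PySem.Int.mod st.1 2 ≠ 0 then st.1 - 1 else st.1
  (n', st.2 + pvFactA x.toNat)

def sum_even_factorials (n : Int) : Int :=
  ((PySem.List.pyRange n (-1) (-2)).foldl pvStepA (n, 0)).2

-- ===== PORT B =====
-- loop body of B: state = (fact, total); p is n % 2, computed once from the parameter
def pvStepB (p : Int) (st : Int × Int) (i : Int) : Int × Int :=
  let f := if 0 < i then st.1 * i else st.1
  let t := if PySem.Int.mod i 2 = p then st.2 + f else st.2
  (f, t)

def sum_even_factorials_alt (n : Int) : Int :=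
  ((PySem.List.pyRange 0 (n + 1) 1).foldl (pvStepB (PySem.Int.mod n 2)) (1, 0)).2

-- ===== PRECONDITION & SPEC =====
-- Pre_ excludes the inputs on which A's recursive factorial raises RecursionError under
-- CPython's default recursion limit of 1000: at top level A raises for every n ≥ 997, and
-- the boundary is not a fixed property of n — each frame of caller nesting lowers it by
-- one (e.g. called 50 frames deep A already raises at n = 947) — so Pre_ stops at 990,
-- a few frames below the shallowest boundary; on the handful of excluded inputs where a
-- sufficiently shallow call still returns (991..996 at top level), B returns the same value.
def Pre_sum_even_factorials (n : Int) : Prop := n ≤ 990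
instance (n : Int) : Decidable (Pre_sum_even_factorials n) := by unfold Pre_sum_even_factorials; infer_instance
def pvWitness_sum_even_factorials : Int := 6

def Spec_sum_even_factorials (n : Int) (out : Int) : Prop := out = sum_even_factorials_alt n
instance (n : Int) (out : Int) : Decidable (Spec_sum_even_factorials n out) := by unfold Spec_sum_even_factorials; infer_instance

-- ===== CLAIM (what is proved, stated in full; the proofs are below) =====
def Claim_equal_sum_even_factorials : Prop := ∀ (n : Int), Dom_sum_even_factorials n → Pre_sum_even_factorials n → Spec_sum_even_factorials n (sum_even_factorials n)

-- ===== LEMMAS AND PROOFS =====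

-- common reference value: S m = m! + (m-2)! + … + (1! or 0!)
def pvS : Nat → Int
  | 0 => 1
  | 1 => 1
  | m + 2 => pvFactA (m + 2) + pvS m

-- the result component of A's fold ignores the mutated-n component
theorem pvFoldA_snd (l : List Int) (s r : Int) :
    (l.foldl pvStepA (s, r)).2 = r + (l.map (fun x => pvFactA x.toNat)).sum := by
  induction l generalizing s r with
  | nil => simp
  | cons x xs ih => simp [pvStepA, ih, add_assoc]

theorem pvRange_neg_two_nil (n : Int) (h : n < 0) :
    PySem.List.pyRange n (-1) (-2) = [] := by
  simp only [PySem.List.pyRange]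
  norm_num
  intro h'
  omega

theorem pvRange_neg_two_cons (n : Int) (h : 0 ≤ n) :
    PySem.List.pyRange n (-1) (-2) = n :: PySem.List.pyRange (n - 2) (-1) (-2) := by
  simp only [PySem.List.pyRange]
  norm_num
  split_ifs with h1 h2 h3 <;> try omega
  · -- n ≥ 2: peel one element off the front of the count
    have hc : ((n + 1 + 2 - 1) / 2).toNat = ((n - 2 + 1 + 2 - 1) / 2).toNat + 1 := by omega
    rw [hc, List.range_succ_eq_map]
    simp only [List.map_cons, List.map_map]
    congr 1
    · ring_nf
    · apply List.map_congr_left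
      intro k _
      simp only [Function.comp_apply]
      push_cast
      ring
  · -- n = 0 or 1: the tail range is empty and the count is 1
    have hc : ((n + 1 + 2 - 1) / 2).toNat = 1 := by omega
    simp [hc, List.range_succ]

theorem pvSumA (m : Nat) :
    (((PySem.List.pyRange (m : Int) (-1) (-2)).map (fun x => pvFactA x.toNat)).sum = pvS m)
    ∧ (((PySem.List.pyRange ((m : Int) + 1) (-1) (-2)).map (fun x => pvFactA x.toNat)).sum = pvS (m + 1)) := by
  induction m with
  | zero =>
    constructor
    · rw [show ((0 : Nat) : Int) = 0 from rfl,
        pvRange_neg_two_cons 0 (by omega), show (0 : Int) - 2 = -2 by norm_num,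
        pvRange_neg_two_nil (-2) (by omega)]
      simp [pvS, pvFactA]
    · rw [show ((0 : Nat) : Int) + 1 = 1 by norm_num,
        pvRange_neg_two_cons 1 (by omega), show (1 : Int) - 2 = -1 by norm_num,
        pvRange_neg_two_nil (-1) (by omega)]
      simp [pvS, pvFactA]
  | succ k ih =>
    refine ⟨ih.2, ?_⟩
    rw [show ((k + 1 : Nat) : Int) + 1 = (k : Int) + 1 + 1 by push_cast; ring,
      pvRange_neg_two_cons ((k : Int) + 1 + 1) (by omega)]
    have h2 : ((k : Int) + 1 + 1 - 2) = (k : Int) := by ring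
    rw [h2]
    simp only [List.map_cons, List.sum_cons, ih.1]
    have h3 : (((k : Int) + 1 + 1).toNat) = k + 2 := by omega
    rw [h3]
    show pvS (k + 2) = _
    rfl

-- partial sums matched by B's loop: accT p m = Σ_{j < m, j % 2 = p} j!
def pvAccT (p : Int) : Nat → Int
  | 0 => 0
  | m + 1 => pvAccT p m + (if PySem.Int.mod (m : Int) 2 = p then pvFactA m else 0)

theorem pvFoldB (p : Int) (m : Nat) :
    (PySem.List.pyRange 0 (m : Int) 1).foldl (pvStepB p) (1, 0) = (pvFactA (m - 1), pvAccT p m) := by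
  induction m with
  | zero => simp [PySem.List.pyRange_one_eq_nil, pvAccT, pvFactA]
  | succ k ih =>
    have h : PySem.List.pyRange 0 ((k : Int) + 1) 1 = PySem.List.pyRange 0 (k : Int) 1 ++ [(k : Int)] := by
      exact PySem.List.pyRange_one_succ_right (by omega)
    push_cast
    rw [h, List.foldl_append, ih]
    simp only [List.foldl, pvStepB, pvAccT]
    cases k with
    | zero => simp [pvFactA]; split <;> simp
    | succ j =>
      have hpos : (0 : Int) < (j : Int) + 1 := by omega
      have hcast : ((j + 1 : Nat) : Int) = (j : Int) + 1 := by push_cast; ring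
      simp only [Nat.add_sub_cancel, hcast]
      rw [if_pos hpos]
      have : pvFactA j * ((j : Int) + 1) = pvFactA (j + 1) := by
        show _ = ((j : Int) + 1) * pvFactA j
        ring
      rw [this]
      split <;> simp

theorem pvMod_two_cast (m : Nat) : PySem.Int.mod ((m : Int)) 2 = (m : Int) % 2 := by
  rw [PySem.Int.mod_eq_emod_of_pos (by omega)]

theorem pvAccT_parity (m : Nat) :
    (pvAccT (PySem.Int.mod ((m : Int)) 2) (m + 1) = pvS m)
    ∧ (pvAccT (PySem.Int.mod ((m : Int) + 1) 2) (m + 2) = pvS (m + 1)) := by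
  induction m with
  | zero =>
    constructor
    · simp [pvAccT, pvS, pvFactA]
    · show pvAccT (PySem.Int.mod 1 2) 2 = 1
      have h1 : PySem.Int.mod (1 : Int) 2 = 1 := by
        rw [PySem.Int.mod_eq_emod_of_pos (by omega)]; decide
      have h0 : PySem.Int.mod ((0 : Nat) : Int) 2 = 0 := by
        rw [pvMod_two_cast]; simp
      simp only [pvAccT, h1]
      norm_num [h0, pvFactA]
  | succ k ih =>
    have hcast : ((k + 1 : Nat) : Int) = (k : Int) + 1 := by push_cast; ring
    have hsame : PySem.Int.mod ((k : Int) + 1 + 1) 2 = PySem.Int.mod ((k : Int)) 2 := by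
      rw [PySem.Int.mod_eq_emod_of_pos (by omega), PySem.Int.mod_eq_emod_of_pos (by omega)]
      omega
    have hdiff : ¬ PySem.Int.mod ((k : Int) + 1) 2 = PySem.Int.mod ((k : Int)) 2 := by
      rw [PySem.Int.mod_eq_emod_of_pos (by omega), PySem.Int.mod_eq_emod_of_pos (by omega)]
      omega
    constructor
    · rw [hcast]; exact ih.2
    · rw [hcast]
      show pvAccT (PySem.Int.mod ((k : Int) + 1 + 1) 2) (k + 3) = pvS (k + 2)
      rw [hsame]
      have e3 : pvAccT (PySem.Int.mod ((k : Int)) 2) (k + 3)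
          = pvAccT (PySem.Int.mod ((k : Int)) 2) (k + 2)
            + (if PySem.Int.mod ((k + 2 : Nat) : Int) 2 = PySem.Int.mod ((k : Int)) 2 then pvFactA (k + 2) else 0) := rfl
      have e2 : pvAccT (PySem.Int.mod ((k : Int)) 2) (k + 2)
          = pvAccT (PySem.Int.mod ((k : Int)) 2) (k + 1)
            + (if PySem.Int.mod ((k + 1 : Nat) : Int) 2 = PySem.Int.mod ((k : Int)) 2 then pvFactA (k + 1) else 0) := rfl
      have hc2 : ((k + 2 : Nat) : Int) = (k : Int) + 1 + 1 := by push_cast; ring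
      have hc1 : ((k + 1 : Nat) : Int) = (k : Int) + 1 := by push_cast; ring
      rw [e3, e2, hc2, hc1, if_pos hsame, if_neg hdiff, ih.1]
      show pvS k + 0 + pvFactA (k + 2) = pvFactA (k + 2) + pvS k
      ring

-- ===== VERDICT (by name: the statement is the Claim_ definition above) =====
theorem sum_even_factorials_spec : Claim_equal_sum_even_factorials := by
  intro n _ _
  show sum_even_factorials n = sum_even_factorials_alt n
  by_cases h : 0 ≤ n
  · obtain ⟨m, rfl⟩ : ∃ m : Nat, n = (m : Int) := ⟨n.toNat, by omega⟩
    unfold sum_even_factorials sum_even_factorials_alt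
    rw [pvFoldA_snd, (pvSumA m).1]
    have : ((m : Int) + 1) = (((m + 1 : Nat)) : Int) := by push_cast; ring
    rw [this, pvFoldB]
    simpa using (pvAccT_parity m).1.symm
  · unfold sum_even_factorials sum_even_factorials_alt
    rw [pvRange_neg_two_nil n (by omega), PySem.List.pyRange_one_eq_nil (by omega)]
    rfl
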